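-- pv_equiv track=rewrite | github.com/maprk/problem_solving | baekjoon/BOJ-17140.py | R_operation
-- ===== SOURCE A (Python) =====
-- from collections import defaultdict
--
-- def R_operation(A):
--     max_length = 0
--     result = []
--
--     for i in range(len(A)):
--         number_dic = defaultdict(int)
--
--         for j in range(len(A[0])):
--             number = A[i][j]
--             number_dic[number] += 1
--
--         temp = []
--
--         for key, value in sorted(number_dic.items(), key=lambda x: (x[1], x[0])):
--             if key == 0:
--                 continue
--
--             temp.append(key)
--             temp.append(value)
--
--         result.append(temp)
--         max_length = max(max_length, len(temp))
--
--     return make_R(result, max_length)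
--
-- def make_R(array, max_length):
--     if max_length > 100:
--         max_length = 100
--
--     result = [[0 for _ in range(max_length)] for _ in range(len(array))]
--
--     for i in range(len(array)):
--         length = len(array[i])
--
--         if length > 100:
--             length = 100
--
--         for j in range(length):
--             result[i][j] = array[i][j]
--
--     return result
-- ===== SOURCE B (Python) =====
-- def R_operation(A):
--     width = len(A[0]) if A else 0
--     rows = []
--     for row in A:
--         pairs = []
--         for v in reversed(sorted(row[:width])):
--             if pairs and pairs[0][1] == v:
--                 pairs[0] = (pairs[0][0] + 1, v)
--             else:
--                 pairs.insert(0, (1, v))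
--         pairs.sort()
--         flat = [x for c, v in pairs if v != 0 for x in (v, c)]
--         rows.append(flat[:100])
--     width_out = min(max((len(r) for r in rows), default=0), 100)
--     return [r + [0] * (width_out - len(r)) for r in rows]
-- ===== Notes on version B (the rewrite author's own statement) =====
-- stated objective: alternative
-- what changed: Per row, B sorts the row (sliced to the first row's width) and run-length-groups consecutive equal values into (count,value) pairs instead of incrementing a defaultdict, sorts the pairs as tuples, and pads by list concatenation instead of writing into a preallocated zero matrix.
import Mathlib
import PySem

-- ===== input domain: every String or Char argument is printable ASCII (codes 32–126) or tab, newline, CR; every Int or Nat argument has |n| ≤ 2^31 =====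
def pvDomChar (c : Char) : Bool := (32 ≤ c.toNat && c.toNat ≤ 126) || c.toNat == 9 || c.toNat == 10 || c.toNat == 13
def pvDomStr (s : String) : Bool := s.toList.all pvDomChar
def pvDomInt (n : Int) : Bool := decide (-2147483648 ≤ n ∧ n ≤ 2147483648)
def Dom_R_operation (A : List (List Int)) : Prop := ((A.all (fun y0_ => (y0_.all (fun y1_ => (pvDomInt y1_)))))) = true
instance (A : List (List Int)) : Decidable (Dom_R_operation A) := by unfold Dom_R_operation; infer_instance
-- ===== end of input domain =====

-- ===== PORT A =====
-- B groups each row (sliced to the first row's width) by sorting + run-length instead of a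
-- dict counter, and pads by list concatenation instead of writing into a preallocated zero
-- matrix; same return value wherever A returns (objective: alternative, no speed claim).

def pvMakeR (array : List (List Int)) (maxLength : Int) : List (List Int) :=
  let m := if maxLength > 100 then (100 : Int) else maxLength
  array.map (fun row =>
    let length := if PySem.List.len row > 100 then (100 : Int) else PySem.List.len row
    (PySem.List.pyRange 0 length).foldl
      (fun res j => res.set j.toNat (PySem.List.pyGetD row j 0))
      ((PySem.List.pyRange 0 m).map (fun _ => (0 : Int))))

def R_operation (A : List (List Int)) : List (List Int) :=
  let st := (PySem.List.pyRange 0 (PySem.List.len A)).foldl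
    (fun (st : Int × List (List Int)) i =>
      let row := PySem.List.pyGetD A i []
      let dic := (PySem.List.pyRange 0 (PySem.List.len (PySem.List.pyGetD A 0 []))).foldl
        (fun d j => d.modify (PySem.List.pyGetD row j 0) 0 (· + 1)) PySem.Dict.empty
      let temp := (PySem.List.sorted2 dic.items (fun x => x.2) (fun x => x.1)).foldl
        (fun t kv => if kv.1 = 0 then t else (t ++ [kv.1]) ++ [kv.2]) []
      (max st.1 (PySem.List.len temp), st.2 ++ [temp]))
    (0, ([] : List (List Int)))
  pvMakeR st.2 st.1

-- ===== PORT B =====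
def pvRle (s : List Int) : List (Int × Int) :=
  s.foldr (fun v pairs =>
    match pairs with
    | (c, w) :: tail => if w = v then (c + 1, v) :: tail else (1, v) :: (c, w) :: tail
    | [] => [(1, v)]) []

def R_operation_alt (A : List (List Int)) : List (List Int) :=
  let width := (A.headD []).length
  let rows := A.map (fun row =>
    let pairs := PySem.List.sorted2 (pvRle (PySem.List.sorted (row.take width) (fun v => v)))
      (fun p => p.1) (fun p => p.2)
    ((pairs.filter (fun p => p.2 != 0)).flatMap (fun p => [p.2, p.1])).take 100)
  let widthOut := min (rows.foldl (fun m r => max m r.length) 0) 100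
  rows.map (fun r => r ++ List.replicate (widthOut - r.length) 0)

-- ===== PRECONDITION & SPEC =====
-- Pre_ is exactly A's return domain: A raises IndexError as soon as some row is shorter
-- than row 0 (it reads every row at the indices 0..len(A[0])-1), and returns on all other inputs.
def Pre_R_operation (A : List (List Int)) : Prop :=
  ∀ row ∈ A, (A.headD []).length ≤ row.length
instance (A : List (List Int)) : Decidable (Pre_R_operation A) := by
  unfold Pre_R_operation; infer_instance
def pvWitness_R_operation : List (List Int) := [[1, 2, 2], [0, 3, 3]]

def Spec_R_operation (A : List (List Int)) (out : List (List Int)) : Prop := out = R_operation_alt A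
instance (A : List (List Int)) (out : List (List Int)) : Decidable (Spec_R_operation A out) := by unfold Spec_R_operation; infer_instance

-- ===== CLAIM (what is proved, stated in full; the proofs are below) =====
def Claim_equal_R_operation : Prop := ∀ (A : List (List Int)), Dom_R_operation A → Pre_R_operation A → Spec_R_operation A (R_operation A)

-- ===== LEMMAS AND PROOFS =====

-- Python's lexicographic "before" on (Int, Int) pairs, as sorted2 builds it.
def pvBefore (a b : Int × Int) : Bool :=
  decide (a.1 < b.1) || (!decide (b.1 < a.1) && decide (a.2 < b.2))

-- the non-strict lexicographic order pvBefore sorts by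
def pvLe (a b : Int × Int) : Prop := a.1 < b.1 ∨ (a.1 = b.1 ∧ a.2 ≤ b.2)

lemma pvSorted2_fst_snd (xs : List (Int × Int)) :
    PySem.List.sorted2 xs (fun p => p.1) (fun p => p.2) =
      xs.foldl (fun acc x => PySem.List.insertBy pvBefore x acc) [] := rfl

lemma pvSorted2_snd_fst (xs : List (Int × Int)) :
    PySem.List.sorted2 xs (fun p => p.2) (fun p => p.1) =
      xs.foldl (fun acc x => PySem.List.insertBy (fun a b => pvBefore a.swap b.swap) x acc) [] := rfl

lemma pvInsertBy_swap (x : Int × Int) (ys : List (Int × Int)) :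
    PySem.List.insertBy pvBefore x.swap (ys.map Prod.swap) =
      (PySem.List.insertBy (fun a b => pvBefore a.swap b.swap) x ys).map Prod.swap := by
  induction ys with
  | nil => rfl
  | cons y ys ih =>
    simp only [List.map_cons, PySem.List.insertBy]
    by_cases h : pvBefore x.swap y.swap = true
    · simp [h]
    · simp [h, ih]

lemma pvFoldl_insertBy_swap (xs ys : List (Int × Int)) :
    (xs.map Prod.swap).foldl (fun acc x => PySem.List.insertBy pvBefore x acc) (ys.map Prod.swap) =
      (xs.foldl (fun acc x => PySem.List.insertBy (fun a b => pvBefore a.swap b.swap) x acc) ys).map Prod.swap := by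
  induction xs generalizing ys with
  | nil => rfl
  | cons x xs ih =>
    simp only [List.map_cons, List.foldl_cons]
    rw [pvInsertBy_swap, ih]

lemma pvLe_of_before {a b : Int × Int} (h : pvBefore a b = true) : pvLe a b := by
  simp [pvBefore] at h; simp [pvLe]; omega

lemma pvLe_of_not_before {a b : Int × Int} (h : pvBefore a b = false) : pvLe b a := by
  simp [pvBefore] at h; simp [pvLe]; omega

lemma pvLe_trans {a b c : Int × Int} (h1 : pvLe a b) (h2 : pvLe b c) : pvLe a c := by
  simp [pvLe] at *; omega

lemma pvLe_antisymm {a b : Int × Int} (h1 : pvLe a b) (h2 : pvLe b a) : a = b := by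
  simp [pvLe] at *
  have : a.1 = b.1 ∧ a.2 = b.2 := by omega
  exact Prod.ext this.1 this.2

lemma pvPairwise_insertBy (x : Int × Int) (ys : List (Int × Int))
    (h : ys.Pairwise pvLe) : (PySem.List.insertBy pvBefore x ys).Pairwise pvLe := by
  induction ys with
  | nil => simp [PySem.List.insertBy]
  | cons y ys ih =>
    rcases List.pairwise_cons.mp h with ⟨hy, hys⟩
    by_cases hb : pvBefore x y = true
    · simp only [PySem.List.insertBy, if_pos hb]
      refine List.pairwise_cons.mpr ⟨?_, h⟩
      intro z hz
      rcases List.mem_cons.mp hz with rfl | hz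
      · exact pvLe_of_before hb
      · exact pvLe_trans (pvLe_of_before hb) (hy z hz)
    · simp only [PySem.List.insertBy, if_neg hb]
      refine List.pairwise_cons.mpr ⟨?_, ih hys⟩
      intro z hz
      rcases (PySem.List.mem_insertBy _ x z ys).mp hz with rfl | hz
      · exact pvLe_of_not_before (eq_false_of_ne_true hb)
      · exact hy z hz

lemma pvPairwise_foldl (xs : List (Int × Int)) (acc : List (Int × Int))
    (h : acc.Pairwise pvLe) :
    (xs.foldl (fun acc x => PySem.List.insertBy pvBefore x acc) acc).Pairwise pvLe := by
  induction xs generalizing acc with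
  | nil => exact h
  | cons x xs ih => exact ih _ (pvPairwise_insertBy x acc h)

lemma pvSorted2_eq_of_perm {xs ys : List (Int × Int)} (h : xs.Perm ys) :
    PySem.List.sorted2 xs (fun p => p.1) (fun p => p.2) =
      PySem.List.sorted2 ys (fun p => p.1) (fun p => p.2) := by
  refine List.Perm.eq_of_pairwise (le := pvLe) (fun a b _ _ hab hba => pvLe_antisymm hab hba) ?_ ?_ ?_
  · rw [pvSorted2_fst_snd]; exact pvPairwise_foldl xs [] (by simp)
  · rw [pvSorted2_fst_snd]; exact pvPairwise_foldl ys [] (by simp)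
  · exact (PySem.List.sorted2_perm xs _ _ false).trans (h.trans (PySem.List.sorted2_perm ys _ _ false).symm)

-- first element of every run of equal adjacent values
def pvRuns : List Int → List Int
  | [] => []
  | v :: rest => match pvRuns rest with
    | [] => [v]
    | w :: t => if w = v then w :: t else v :: w :: t

lemma pvRuns_cons (v : Int) (rest : List Int) :
    ∃ t, pvRuns (v :: rest) = v :: t := by
  cases hr : pvRuns rest with
  | nil => exact ⟨[], by simp [pvRuns, hr]⟩
  | cons w t =>
    by_cases h : w = v
    · exact ⟨t, by simp [pvRuns, hr, h]⟩
    · exact ⟨w :: t, by simp [pvRuns, hr, h]⟩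

lemma pvRuns_nil_of (rest : List Int) (hr : pvRuns rest = []) : rest = [] := by
  cases rest with
  | nil => rfl
  | cons a b => rcases pvRuns_cons a b with ⟨t, ht⟩; rw [ht] at hr; cases hr

lemma pvMem_runs (s : List Int) : ∀ x : Int, x ∈ pvRuns s ↔ x ∈ s := by
  induction s with
  | nil => simp [pvRuns]
  | cons v rest ih =>
    intro x
    cases hr : pvRuns rest with
    | nil =>
      have hrest : rest = [] := pvRuns_nil_of rest hr
      subst hrest; simp [pvRuns]
    | cons w t =>
      by_cases h : w = v
      · subst h
        have hpv : pvRuns (w :: rest) = w :: t := by simp [pvRuns, hr]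
        rw [hpv]
        constructor
        · intro hx
          rcases List.mem_cons.mp hx with rfl | hx
          · simp
          · have hx2 : x ∈ pvRuns rest := by rw [hr]; exact List.mem_cons_of_mem _ hx
            exact List.mem_cons_of_mem _ ((ih x).mp hx2)
        · intro hx
          rcases List.mem_cons.mp hx with rfl | hx
          · simp
          · have hx2 := (ih x).mpr hx; rw [hr] at hx2; exact hx2
      · have hpv : pvRuns (v :: rest) = v :: w :: t := by simp [pvRuns, hr, h]
        rw [hpv]
        constructor
        · intro hx
          rcases List.mem_cons.mp hx with rfl | hx
          · simp
          · have hx2 : x ∈ pvRuns rest := by rw [hr]; exact hx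
            exact List.mem_cons_of_mem _ ((ih x).mp hx2)
        · intro hx
          rcases List.mem_cons.mp hx with rfl | hx
          · simp
          · have hx2 := (ih x).mpr hx; rw [hr] at hx2
            exact List.mem_cons_of_mem _ hx2

lemma pvRuns_pairwise_lt (s : List Int) : s.Pairwise (· ≤ ·) → (pvRuns s).Pairwise (· < ·) := by
  induction s with
  | nil => intro _; simp [pvRuns]
  | cons v rest ih =>
    intro h
    rcases List.pairwise_cons.mp h with ⟨hv, hrest⟩
    have hp := ih hrest
    cases hr : pvRuns rest with
    | nil => simp [pvRuns, hr]
    | cons w t =>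
      rw [hr] at hp
      have hwrest : w ∈ rest := (pvMem_runs rest w).mp (by rw [hr]; simp)
      by_cases hwv : w = v
      · have hpv : pvRuns (v :: rest) = w :: t := by simp [pvRuns, hr, hwv]
        rw [hpv]; exact hp
      · have hpv : pvRuns (v :: rest) = v :: w :: t := by simp [pvRuns, hr, hwv]
        rw [hpv]
        refine List.pairwise_cons.mpr ⟨?_, hp⟩
        intro z hz
        rcases List.mem_cons.mp hz with rfl | hz
        · exact lt_of_le_of_ne (hv z hwrest) (fun he => hwv he.symm)
        · exact lt_of_le_of_lt (hv w hwrest) ((List.pairwise_cons.mp hp).1 z hz)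

lemma pvRle_eq (s : List Int) : s.Pairwise (· ≤ ·) →
    pvRle s = (pvRuns s).map (fun v => ((List.count v s : Int), v)) := by
  induction s with
  | nil => intro _; rfl
  | cons v rest ih =>
    intro h
    rcases List.pairwise_cons.mp h with ⟨hv, hrest⟩
    have hstep : pvRle (v :: rest) = (match pvRle rest with
      | (c, w) :: tail => if w = v then (c + 1, v) :: tail else (1, v) :: (c, w) :: tail
      | [] => [(1, v)]) := rfl
    rw [hstep, ih hrest]
    cases hr : pvRuns rest with
    | nil =>
      have hrest0 : rest = [] := pvRuns_nil_of rest hr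
      subst hrest0
      simp [pvRuns]
    | cons w t =>
      have hruns := pvRuns_pairwise_lt rest hrest
      rw [hr] at hruns
      have hwt : ∀ u ∈ t, w < u := (List.pairwise_cons.mp hruns).1
      have hwrest : w ∈ rest := (pvMem_runs rest w).mp (by rw [hr]; simp)
      simp only [List.map_cons]
      by_cases hwv : w = v
      · subst hwv
        have hpv : pvRuns (w :: rest) = w :: t := by simp [pvRuns, hr]
        have hmap : List.map (fun u => ((List.count u (w :: rest) : Int), u)) t =
            List.map (fun u => ((List.count u rest : Int), u)) t := by
          refine List.map_congr_left ?_
          intro u hu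
          have huw : u ≠ w := by have := hwt u hu; omega
          simp [Ne.symm huw]
        rw [hpv, List.map_cons, hmap, List.count_cons_self]
        push_cast
        ring_nf
        simp
      · have hvnotin : v ∉ rest := by
          intro hvin
          have hv2 : v ∈ pvRuns rest := (pvMem_runs rest v).mpr hvin
          rw [hr] at hv2
          rcases List.mem_cons.mp hv2 with rfl | hv2
          · exact hwv rfl
          · have h1 := hwt v hv2
            have h2 := hv w hwrest
            omega
        have hpv : pvRuns (v :: rest) = v :: w :: t := by simp [pvRuns, hr, hwv]
        have hmap : List.map (fun u => ((List.count u (v :: rest) : Int), u)) t =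
            List.map (fun u => ((List.count u rest : Int), u)) t := by
          refine List.map_congr_left ?_
          intro u hu
          have hune : u ≠ v := by
            intro he; subst he
            exact hvnotin ((pvMem_runs rest u).mp (by rw [hr]; exact List.mem_cons_of_mem _ hu))
          simp [Ne.symm hune]
        have hcv : List.count v (v :: rest) = 1 := by
          rw [List.count_cons_self, List.count_eq_zero_of_not_mem hvnotin]
        have hcw : List.count w (v :: rest) = List.count w rest := by
          simp [Ne.symm hwv]
        rw [hpv, List.map_cons, List.map_cons, hmap, hcv, hcw, if_neg hwv]
        norm_num

lemma pvFoldl_temp (l : List (Int × Int)) (acc : List Int) :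
    l.foldl (fun t kv => if kv.1 = 0 then t else (t ++ [kv.1]) ++ [kv.2]) acc =
      acc ++ (l.filter (fun kv => kv.1 != 0)).flatMap (fun kv => [kv.1, kv.2]) := by
  induction l generalizing acc with
  | nil => simp
  | cons kv l ih =>
    by_cases h : kv.1 = 0
    · rw [List.foldl_cons, if_pos h, ih]
      simp [h]
    · rw [List.foldl_cons, if_neg h, ih]
      simp [h]

-- the per-row value A computes (with the dict loop already reduced to a counter)
def pvTempA (row : List Int) : List Int :=
  ((PySem.List.sorted2 ((PySem.Dict.counter row).items) (fun x => x.2) (fun x => x.1)).filter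
    (fun kv => kv.1 != 0)).flatMap (fun kv => [kv.1, kv.2])

-- the per-row (untruncated) value B computes equals A's
lemma pvRow_core (row : List Int) :
    ((PySem.List.sorted2 (pvRle (PySem.List.sorted row (fun v => v)))
        (fun p => p.1) (fun p => p.2)).filter (fun p => p.2 != 0)).flatMap (fun p => [p.2, p.1]) =
      pvTempA row := by
  have hsorted : (PySem.List.sorted row (fun v => v)).Pairwise (· ≤ ·) :=
    PySem.List.sorted_pairwise row (fun v => v)
  have hcount : ∀ u : Int, List.count u (PySem.List.sorted row (fun v => v)) = List.count u row :=
    fun u => (PySem.List.sorted_perm row (fun v => v) false).count_eq u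
  have h1 : pvRle (PySem.List.sorted row (fun v => v)) =
      ((pvRuns (PySem.List.sorted row (fun v => v))).map
        (fun v => (v, (List.count v row : Int)))).map Prod.swap := by
    rw [pvRle_eq _ hsorted, List.map_map]
    refine List.map_congr_left ?_
    intro u _
    simp [Function.comp, Prod.swap, hcount u]
  have hperm : (pvRuns (PySem.List.sorted row (fun v => v))).Perm (PySem.Set.ofList row) := by
    refine (List.perm_ext_iff_of_nodup ?_ (PySem.Set.nodup_ofList row)).mpr ?_
    · unfold List.Nodup
      exact (pvRuns_pairwise_lt _ hsorted).imp (fun h => ne_of_lt h)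
    · intro a
      rw [pvMem_runs, (PySem.List.sorted_perm row (fun v => v) false).mem_iff,
        PySem.Set.mem_ofList]
  have hswap : ∀ xs : List (Int × Int),
      PySem.List.sorted2 (xs.map Prod.swap) (fun p => p.1) (fun p => p.2) =
        (PySem.List.sorted2 xs (fun p => p.2) (fun p => p.1)).map Prod.swap := by
    intro xs
    rw [pvSorted2_fst_snd, pvSorted2_snd_fst]
    simpa using pvFoldl_insertBy_swap xs []
  have h2 : PySem.List.sorted2 (pvRle (PySem.List.sorted row (fun v => v)))
      (fun p => p.1) (fun p => p.2) =
      (PySem.List.sorted2 ((PySem.Dict.counter row).items) (fun x => x.2) (fun x => x.1)).map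
        Prod.swap := by
    rw [h1, pvSorted2_eq_of_perm (List.Perm.map Prod.swap
      (List.Perm.map (fun v => (v, (List.count v row : Int))) hperm)), hswap]
    rw [PySem.Dict.items_counter row]
  rw [h2, pvTempA]
  rw [List.filter_map, List.flatMap_map]
  refine congrArg _ ?_
  refine congrArg₂ _ ?_ ?_
  · funext p; simp
  · refine congrArg₂ _ ?_ rfl
    funext p; simp

lemma pvFill (t Z : List Int) (n : Nat) (h1 : n ≤ t.length) (h2 : n ≤ Z.length) :
    (PySem.List.pyRange 0 (n : Int)).foldl
        (fun res j => res.set j.toNat (PySem.List.pyGetD t j 0)) Z =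
      t.take n ++ Z.drop n := by
  induction n with
  | zero => simp
  | succ n ih =>
    have hn1 : n < t.length := by omega
    have hn2 : n < Z.length := by omega
    rw [show ((n + 1 : Nat) : Int) = (n : Int) + 1 by push_cast; ring,
      PySem.List.pyRange_one_succ_right (by positivity), List.foldl_append,
      ih (by omega) (by omega)]
    simp only [List.foldl_cons, List.foldl_nil]
    have hget : PySem.List.pyGetD t (n : Int) 0 = t[n] := by
      rw [PySem.List.pyGetD_natCast]
      exact List.getD_eq_getElem t 0 hn1
    rw [show ((n : Int).toNat) = n by omega, hget,
      List.set_append_right _ _ (by simp [hn1.le]),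
      List.drop_eq_getElem_cons hn2]
    have hlen : (t.take n).length = n := by simp [hn1.le]
    have htake : t.take (n + 1) = t.take n ++ [t[n]] := by
      rw [List.take_add_one, List.getElem?_eq_getElem hn1]
      rfl
    rw [hlen, Nat.sub_self, List.set_cons_zero, htake, List.append_assoc]
    rfl

lemma pvMaxfold_cast (ts : List (List Int)) (n : Nat) :
    ts.foldl (fun m t => max m (PySem.List.len t)) (n : Int) =
      ((ts.foldl (fun m t => max m t.length) n : Nat) : Int) := by
  induction ts generalizing n with
  | nil => rfl
  | cons t ts ih =>
    simp only [List.foldl_cons]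
    rw [show max (n : Int) (PySem.List.len t) = ((max n t.length : Nat) : Int) by
      simp [PySem.List.len, Nat.cast_max], ih]

lemma pvMinfold (ls : List Nat) (n m : Nat) (h : min n 100 = min m 100) :
    min (ls.foldl (fun a b => max a (min 100 b)) n) 100 = min (ls.foldl max m) 100 := by
  induction ls generalizing n m with
  | nil => exact h
  | cons x ls ih =>
    simp only [List.foldl_cons]
    exact ih _ _ (by omega)


-- the per-row temp exactly as R_operation's loop body computes it
def pvT (A : List (List Int)) (row : List Int) : List Int :=
  (PySem.List.sorted2 (((PySem.List.pyRange 0 (PySem.List.len (PySem.List.pyGetD A 0 []))).foldl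
      (fun d j => d.modify (PySem.List.pyGetD row j 0) 0 (· + 1)) PySem.Dict.empty).items)
    (fun x => x.2) (fun x => x.1)).foldl
    (fun t kv => if kv.1 = 0 then t else (t ++ [kv.1]) ++ [kv.2]) []

lemma pvT_eq (A : List (List Int)) (hPre : Pre_R_operation A) (row : List Int)
    (hrow : row ∈ A) : pvT A row = pvTempA (row.take (A.headD []).length) := by
  unfold pvT
  have h0 : PySem.List.pyGetD A 0 [] = A.headD [] := by
    rw [show (0 : Int) = ((0 : Nat) : Int) from rfl, PySem.List.pyGetD_natCast]
    cases A <;> rfl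
  have hle : (A.headD []).length ≤ row.length := hPre row hrow
  have hlen : PySem.List.len (PySem.List.pyGetD A 0 []) =
      PySem.List.len (row.take (A.headD []).length) := by
    rw [h0]
    show ((A.headD []).length : Int) = ((row.take (A.headD []).length).length : Int)
    rw [List.length_take, min_eq_left hle]
  rw [hlen]
  have hget : ∀ (d : PySem.Dict Int Int),
      ∀ j ∈ PySem.List.pyRange 0 (PySem.List.len (row.take (A.headD []).length)),
      d.modify (PySem.List.pyGetD row j 0) 0 (· + 1) =
        d.modify (PySem.List.pyGetD (row.take (A.headD []).length) j 0) 0 (· + 1) := by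
    intro d j hj
    have hjb := (PySem.List.mem_pyRange_one).mp hj
    have hlt : (List.take (A.headD []).length row).length = (A.headD []).length := by
      rw [List.length_take]; omega
    rw [PySem.List.len, hlt] at hjb
    have hj2 : j < ((List.take (A.headD []).length row).length : Int) := by
      rw [hlt]; omega
    rw [PySem.List.pyGetD_eq_getElem row 0 hjb.1 (by omega),
      PySem.List.pyGetD_eq_getElem _ 0 hjb.1 hj2]
    congr 1
    rw [List.getElem_take]
  rw [PySem.List.foldl_congr_mem _ _ _ PySem.Dict.empty hget,
    PySem.List.foldl_pyRange_pyGetD (row.take (A.headD []).length) (0 : Int)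
    (fun (d : PySem.Dict Int Int) (x : Int) => d.modify x 0 (· + 1)) PySem.Dict.empty
    (le_refl 0)]
  rw [show ((0 : Int).toNat) = 0 from rfl, List.drop_zero, ← PySem.Dict.counter_eq_foldl]
  rw [pvFoldl_temp]
  simp [pvTempA]

lemma pvOuter (T : List Int → List Int) :
    ∀ (l : List (List Int)) (m : Int) (acc : List (List Int)),
    l.foldl (fun st row => (max st.1 (PySem.List.len (T row)), st.2 ++ [T row])) (m, acc) =
      (l.foldl (fun m row => max m (PySem.List.len (T row))) m, acc ++ l.map T) := by
  intro l
  induction l with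
  | nil => intro m acc; simp
  | cons r l ih =>
    intro m acc
    simp only [List.foldl_cons]
    rw [ih]
    simp

lemma pvFinal (ts : List (List Int)) :
    pvMakeR ts (ts.foldl (fun m t => max m (PySem.List.len t)) 0) =
      (ts.map (fun t => t.take 100)).map (fun r =>
        r ++ List.replicate
          ((min ((ts.map (fun t => t.take 100)).foldl (fun m r => max m r.length) 0) 100)
            - r.length) 0) := by
  have hNmax : ∀ t ∈ ts, t.length ≤ ts.foldl (fun m t => max m t.length) 0 := by
    intro t ht
    rw [show ts.foldl (fun m t => max m t.length) 0 = (ts.map List.length).foldl max 0 from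
      (List.foldl_map).symm]
    exact (PySem.List.le_foldl_max (ts.map List.length) 0).2 _ (List.mem_map_of_mem ht)
  have hWmin : min ((ts.map (fun t => t.take 100)).foldl (fun m r => max m r.length) 0) 100 =
      min (ts.foldl (fun m t => max m t.length) 0) 100 := by
    rw [List.foldl_map,
      show (fun (m : Nat) (t : List Int) => max m (List.take 100 t).length) =
        (fun m t => max m (min 100 t.length)) from funext (fun m => funext (fun t => by
          rw [List.length_take])),
      show ts.foldl (fun (m : Nat) t => max m (min 100 t.length)) 0 =
        (ts.map List.length).foldl (fun a b => max a (min 100 b)) 0 from by rw [List.foldl_map],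
      show ts.foldl (fun (m : Nat) t => max m t.length) 0 =
        (ts.map List.length).foldl max 0 from by rw [List.foldl_map]]
    exact pvMinfold _ 0 0 rfl
  rw [hWmin]
  have hM : ts.foldl (fun m t => max m (PySem.List.len t)) 0 =
      ((ts.foldl (fun m t => max m t.length) 0 : Nat) : Int) := by
    simpa using pvMaxfold_cast ts 0
  rw [hM]
  simp only [pvMakeR, List.map_map]
  set N : Nat := ts.foldl (fun m t => max m t.length) (0 : Nat) with hNdef
  have hm : (if (N : Int) > 100 then (100 : Int) else (N : Int)) = ((min N 100 : Nat) : Int) := by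
    split_ifs with h <;> push_cast <;> omega
  rw [hm]
  have hz : (PySem.List.pyRange 0 ((min N 100 : Nat) : Int)).map (fun _ => (0 : Int)) =
      List.replicate (min N 100) 0 := by
    rw [PySem.List.pyRange_zero_natCast, List.map_map]
    simp only [Function.comp_def]
    rw [List.map_const', List.length_range]
  rw [hz]
  refine List.map_congr_left ?_
  intro t ht
  have hL : (if PySem.List.len t > 100 then (100 : Int) else PySem.List.len t) =
      ((min t.length 100 : Nat) : Int) := by
    rw [show PySem.List.len t = (t.length : Int) from rfl]
    split_ifs with h <;> push_cast <;> omega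
  have htN : t.length ≤ N := hNmax t ht
  rw [hL, pvFill t _ (min t.length 100) (by omega) (by rw [List.length_replicate]; omega)]
  rw [List.drop_replicate]
  have htake : t.take (min t.length 100) = t.take 100 := by
    rcases Nat.le_total t.length 100 with h | h
    · rw [min_eq_left h, List.take_of_length_le h, List.take_of_length_le (le_refl _)]
    · rw [min_eq_right h]
  rw [htake]
  congr 1
  rw [List.length_take]
  congr 1
  omega

theorem R_operation_spec : Claim_equal_R_operation := by
  intro A _hDom hPre
  unfold Spec_R_operation
  have hF := PySem.List.foldl_pyRange_pyGetD A ([] : List Int)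
    (fun (st : Int × List (List Int)) row =>
      (max st.1 (PySem.List.len (pvT A row)), st.2 ++ [pvT A row]))
    ((0 : Int), ([] : List (List Int))) (a := 0) (le_refl 0)
  have h0 : R_operation A = pvMakeR
      ((PySem.List.pyRange 0 (PySem.List.len A)).foldl
        (fun (st : Int × List (List Int)) i =>
          (max st.1 (PySem.List.len (pvT A (PySem.List.pyGetD A i []))),
            st.2 ++ [pvT A (PySem.List.pyGetD A i [])])) (0, [])).2
      ((PySem.List.pyRange 0 (PySem.List.len A)).foldl
        (fun (st : Int × List (List Int)) i =>
          (max st.1 (PySem.List.len (pvT A (PySem.List.pyGetD A i []))),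
            st.2 ++ [pvT A (PySem.List.pyGetD A i [])])) (0, [])).1 := rfl
  rw [h0, hF]
  rw [show ((0 : Int).toNat) = 0 from rfl, List.drop_zero, pvOuter (pvT A) A 0 []]
  have hmapT : A.map (pvT A) = A.map (fun row => pvTempA (row.take (A.headD []).length)) :=
    List.map_congr_left (fun row hrow => pvT_eq A hPre row hrow)
  have hfoldT : A.foldl (fun m row => max m (PySem.List.len (pvT A row))) 0 =
      (A.map (fun row => pvTempA (row.take (A.headD []).length))).foldl
        (fun m t => max m (PySem.List.len t)) 0 := by
    rw [List.foldl_map]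
    exact PySem.List.foldl_congr_mem A _ _ 0
      (fun acc row hrow => by rw [pvT_eq A hPre row hrow])
  simp only [List.nil_append]
  rw [hmapT, hfoldT, pvFinal (A.map (fun row => pvTempA (row.take (A.headD []).length)))]
  unfold R_operation_alt
  have hrow : A.map (fun row =>
      (((PySem.List.sorted2 (pvRle (PySem.List.sorted (row.take (A.headD []).length)
          (fun v => v)))
        (fun p => p.1) (fun p => p.2)).filter (fun p => p.2 != 0)).flatMap
          (fun p => [p.2, p.1])).take 100) =
      A.map (fun row => (pvTempA (row.take (A.headD []).length)).take 100) :=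
    List.map_congr_left (fun row _ => by rw [pvRow_core (row.take (A.headD []).length)])
  simp only [List.map_map, Function.comp_def]
  rw [hrow]
  refine List.map_congr_left ?_
  intro row _
  rw [pvRow_core (row.take (A.headD []).length)]
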